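-- pv_equiv track=rewrite | github.com/IxZZZ/CTF_JOIN | StudentCTF/Paf_rev/solve.py | reverse_order
-- ===== SOURCE A (Python) =====
-- def reverse_order(str, is_full32=False):
--     res = ''
--     while len(str) % 2 != 0:
--         str = '0'+str
--     if is_full32 == True:
--         while len(str) != 16:
--             str = '0'+str
--     str = str[::-1]
--     for i in range(0, len(str), 2):
--         res += (str[i:i+2])[::-1]
--     return res
-- ===== SOURCE B (Python) =====
-- def reverse_order(str, is_full32=False):
--     # Pad to even length, then (for is_full32) left-pad with zeros up to 16 chars.
--     if len(str) % 2 != 0: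
--         str = '0' + str
--     if is_full32:
--         str = '0' * (16 - len(str)) + str
--     # Consume the string front-to-back, prepending each 2-char pair to the result.
--     res = ''
--     while str:
--         res = str[:2] + res
--         str = str[2:]
--     return res
-- ===== Notes on version B (the rewrite author's own statement) =====
-- stated objective: alternative
-- what changed: A reverses the whole string and then re-reverses each 2-char window of the reversed string; B makes one forward pass over the padded string, prepending each 2-char pair to the result (output built back-to-front), and replaces the padding loops by a parity check and a computed left-pad; the prepend-based pass trades large-input speed (quadratic string prepends) for a plainer single loop.
import Mathlib
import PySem

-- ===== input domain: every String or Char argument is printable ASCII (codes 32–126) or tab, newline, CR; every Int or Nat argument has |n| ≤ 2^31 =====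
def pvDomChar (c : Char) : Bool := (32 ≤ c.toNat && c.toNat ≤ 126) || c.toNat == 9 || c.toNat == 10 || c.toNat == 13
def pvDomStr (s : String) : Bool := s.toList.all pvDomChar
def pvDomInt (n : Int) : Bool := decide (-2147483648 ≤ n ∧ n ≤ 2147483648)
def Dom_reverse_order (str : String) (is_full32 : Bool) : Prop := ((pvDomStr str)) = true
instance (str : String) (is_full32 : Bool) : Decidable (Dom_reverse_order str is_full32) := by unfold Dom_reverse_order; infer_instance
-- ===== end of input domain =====

-- B replaces A's full-string reversal plus per-pair re-reversal by one pass over the padded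
-- string that prepends each 2-char pair to the result (output built back-to-front); same
-- return value wherever A terminates.

-- ===== PORT A =====
-- while len(str) % 2 != 0: str = '0'+str   (prepending flips parity, so length % 2 decreases)
def padEvenA (s : List Char) : List Char :=
  if s.length % 2 ≠ 0 then padEvenA ('0' :: s) else s
termination_by s.length % 2
decreasing_by simp_all [List.length_cons]; omega

-- while len(str) != 16: str = '0'+str   (this Python loop DIVERGES when the string is longer
-- than 16 — those inputs are outside Pre_; fuel 16 covers every terminating run exactly)
def pad16A : Nat → List Char → List Char
  | 0, s => s
  | fuel + 1, s => if s.length ≠ 16 then pad16A fuel ('0' :: s) else s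

-- for i in range(0, len(str), 2): res += (str[i:i+2])[::-1]
def loopA (r : List Char) : List Char :=
  (PySem.List.pyRange 0 (r.length : Int) 2).foldl
    (fun res i => res ++ (PySem.List.slice r (some i) (some (i + 2))).reverse) []

def reverse_order (str : String) (is_full32 : Bool) : String :=
  let s0 := padEvenA str.toList
  let s1 := if is_full32 == true then pad16A 16 s0 else s0
  -- str = str[::-1]  (s[::-1] is reversal: PySem.List.slice?_none_none_neg_one)
  let r := s1.reverse
  String.ofList (loopA r)

-- ===== PORT B =====
-- while str: res = str[:2] + res; str = str[2:]
def pairFlipB (s res : List Char) : List Char :=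
  if s.isEmpty then res
  else pairFlipB (s.drop 2) (s.take 2 ++ res)
termination_by s.length
decreasing_by
  rename_i h
  cases s with
  | nil => simp at h
  | cons x t => simp

def reverse_order_alt (str : String) (is_full32 : Bool) : String :=
  let s0 := if str.toList.length % 2 ≠ 0 then '0' :: str.toList else str.toList
  let s1 := if is_full32 then List.replicate (16 - s0.length) '0' ++ s0 else s0
  String.ofList (pairFlipB s1 [])

-- ===== PRECONDITION & SPEC =====
-- Pre_ excludes only inputs on which A never returns: with is_full32=True and a string whose
-- even-padded length exceeds 16, A's `while len(str) != 16` loop never terminates.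
def Pre_reverse_order (str : String) (is_full32 : Bool) : Prop :=
  is_full32 = true → str.toList.length ≤ 16
instance (str : String) (is_full32 : Bool) : Decidable (Pre_reverse_order str is_full32) := by
  unfold Pre_reverse_order; infer_instance

def pvWitness_reverse_order : String × Bool := ("deadbeef", true)

def Spec_reverse_order (str : String) (is_full32 : Bool) (out : String) : Prop := out = reverse_order_alt str is_full32
instance (str : String) (is_full32 : Bool) (out : String) : Decidable (Spec_reverse_order str is_full32 out) := by unfold Spec_reverse_order; infer_instance

-- ===== CLAIM (what is proved, stated in full; the proofs are below) =====
def Claim_equal_reverse_order : Prop := ∀ (str : String) (is_full32 : Bool), Dom_reverse_order str is_full32 → Pre_reverse_order str is_full32 → Spec_reverse_order str is_full32 (reverse_order str is_full32)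

-- ===== LEMMAS AND PROOFS =====

-- A's first while loop runs at most once
theorem padEvenA_eq (s : List Char) :
    padEvenA s = if s.length % 2 ≠ 0 then '0' :: s else s := by
  rw [padEvenA]
  split
  · rw [padEvenA]
    rename_i h
    simp [List.length_cons]
    omega
  · rfl

-- A's second while loop is a left-pad with zeros (on inputs where it terminates)
theorem pad16A_eq (fuel : Nat) (s : List Char) (hle : s.length ≤ 16)
    (hf : 16 - s.length ≤ fuel) :
    pad16A fuel s = List.replicate (16 - s.length) '0' ++ s := by
  induction fuel generalizing s with
  | zero =>
    have : s.length = 16 := by omega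
    simp [pad16A, this]
  | succ n ih =>
    rw [pad16A]
    split
    · rename_i h
      rw [ih ('0' :: s) (by simp; omega) (by simp; omega)]
      have h1 : 16 - s.length = (16 - ('0' :: s).length) + 1 := by simp; omega
      rw [h1, List.replicate_succ', List.append_assoc]
      rfl
    · rename_i h
      have : s.length = 16 := by omega
      simp [this]

-- B's accumulator peels off as a suffix
theorem pairFlipB_append (s res : List Char) :
    pairFlipB s res = pairFlipB s [] ++ res := by
  by_cases h : s.isEmpty
  · conv_lhs => rw [pairFlipB]
    conv_rhs => rw [pairFlipB]
    simp [h]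
  · conv_lhs => rw [pairFlipB]
    conv_rhs => rw [pairFlipB]
    simp only [if_neg h]
    rw [pairFlipB_append (s.drop 2) (s.take 2 ++ res),
        pairFlipB_append (s.drop 2) (s.take 2 ++ [])]
    simp
termination_by s.length
decreasing_by
  all_goals
    cases s with
    | nil => simp at h
    | cons x t => simp

-- range(0, n, 2) enumerated as doubled naturals
theorem pyRange02 (n : Nat) (h : n % 2 = 0) :
    PySem.List.pyRange 0 (n : Int) 2 = (List.range (n / 2)).map (fun k => ((2 * k : Nat) : Int)) := by
  rw [PySem.List.pyRange_of_pos 0 (n : Int) (by norm_num)]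
  by_cases h0 : (0 : Int) < (n : Int)
  · rw [if_pos h0]
    have he : (((n : Int) - 0 + 2 - 1) / 2).toNat = n / 2 := by omega
    rw [he]
    apply List.map_congr_left
    intro k _
    push_cast
    ring
  · rw [if_neg h0]
    have : n = 0 := by omega
    simp [this]

-- A's loop as a concatenation of the reversed 2-char windows of r
theorem loopA_flat (r : List Char) (h : r.length % 2 = 0) :
    loopA r = (List.range (r.length / 2)).flatMap
      (fun k => (List.take 2 (List.drop (2 * k) r)).reverse) := by
  unfold loopA
  rw [PySem.List.foldl_append_eq_flatMap, pyRange02 _ h, List.flatMap_map]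
  simp only [List.nil_append]
  unfold List.flatMap
  apply congrArg
  apply List.map_congr_left
  intro k _
  have : ((2 * k : Nat) : Int) + 2 = ((2 * k : Nat) : Int) + ((2 : Nat) : Int) := by norm_num
  rw [this, PySem.List.slice_natCast_add]

-- peeling the first pair of the (unreversed) string off A's loop result
theorem loopA_step (a b : Char) (t : List Char) (h : t.length % 2 = 0) :
    loopA (a :: b :: t).reverse = loopA t.reverse ++ [a, b] := by
  have hlr : (a :: b :: t).reverse = t.reverse ++ [b, a] := by simp
  have hlen : (a :: b :: t).reverse.length = t.length + 2 := by simp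
  rw [loopA_flat _ (by simp; omega), loopA_flat _ (by simp [h])]
  rw [hlen]
  have hdiv : (t.length + 2) / 2 = t.length / 2 + 1 := by omega
  rw [hdiv, List.range_succ, List.flatMap_append]
  congr 1
  · simp only [List.length_reverse]
    apply List.flatMap_congr
    intro k hk
    rw [List.mem_range] at hk
    rw [hlr]
    rw [List.drop_append_of_le_length (by simp; omega)]
    rw [List.take_append_of_le_length (by simp; omega)]
  · simp only [List.flatMap_cons, List.flatMap_nil, List.append_nil]
    have h2 : 2 * (t.length / 2) = t.reverse.length := by simp; omega
    rw [hlr, h2, List.drop_left]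
    simp

-- the core equivalence: A's reverse-then-flip-pairs equals B's prepend-pairs pass
theorem loopA_reverse_eq (s : List Char) (h : s.length % 2 = 0) :
    loopA s.reverse = pairFlipB s [] := by
  match s with
  | [] =>
    rw [List.reverse_nil, loopA_flat _ (by simp), pairFlipB]
    simp
  | [a] => simp at h
  | a :: b :: t =>
    have ht : t.length % 2 = 0 := by simp at h; omega
    rw [loopA_step a b t ht, loopA_reverse_eq t ht]
    conv_rhs => rw [pairFlipB]
    simp only [List.isEmpty_cons, Bool.false_eq_true, if_false, List.drop_succ_cons,
      List.drop_zero, List.take_succ_cons, List.take_zero]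
    exact (pairFlipB_append t [a, b]).symm
termination_by s.length

-- ===== VERDICT (by name: the statement is the Claim_ definition above) =====
theorem reverse_order_spec : Claim_equal_reverse_order := by
  intro str is_full32 _ hpre
  unfold Spec_reverse_order reverse_order reverse_order_alt
  rw [padEvenA_eq]
  dsimp only
  cases is_full32 with
  | false =>
    simp only [show ((false == true) = false) from rfl, Bool.false_eq_true, if_false]
    exact congrArg String.ofList (loopA_reverse_eq _
      (by split <;> (try simp only [List.length_cons]) <;> omega))
  | true =>
    have hlen : str.toList.length ≤ 16 := hpre rfl
    simp only [show ((true == true) = true) from rfl, if_true]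
    rw [pad16A_eq 16 _ (by split <;> (try simp only [List.length_cons]) <;> omega)
        (by split <;> (try simp only [List.length_cons]) <;> omega)]
    exact congrArg String.ofList (loopA_reverse_eq _ (by
      split <;>
        (try simp only [List.length_append, List.length_replicate, List.length_cons]) <;> omega))
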